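-- pv_equiv track=rewrite | github.com/vil02/adv_2021 | solutions/adv_2021_20.py | _make_double_iteration
-- ===== SOURCE A (Python) =====
-- import functools
--
-- def get_all_neighbours(in_pos):
--     """
--     Returns the list of all of the neighbouring fields.
--     Result is ordered from top-left to bottom-right.
--     """
--     def make_shift(in_pos, in_shift):
--         return tuple(p+s for (p, s) in zip(in_pos, in_shift))
--     shift_list = (
--         (-1, 1), (0, 1), (1, 1),
--         (-1, 0), (0, 0), (1, 0),
--         (-1, -1), (0, -1), (1, -1))
--     return tuple(make_shift(in_pos, _) for _ in shift_list)
--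
-- def get_bounds(in_pixel_data):
--     """
--     returns the bounds of the binary image
--     represented by the set in_pixel_data
--     """
--     min_x = min(_[0] for _ in in_pixel_data)
--     max_x = max(_[0] for _ in in_pixel_data)
--     min_y = min(_[1] for _ in in_pixel_data)
--     max_y = max(_[1] for _ in in_pixel_data)
--     return min_x, max_x, min_y, max_y
--
-- def _make_double_iteration(in_alg_data, in_pixel_data):
--     def to_char(in_val):
--         return '1' if in_val else '0'
--
--     @functools.lru_cache(None)
--     def get_pixel_inner(in_pos, in_iteration):
--         if in_iteration == 0:
--             res = in_pos in in_pixel_data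
--         else:
--             bin_val_str = ''.join(
--                 to_char(get_pixel_inner(_, in_iteration-1))
--                 for _ in get_all_neighbours(in_pos))
--             res = int(bin_val_str, 2) in in_alg_data
--         return res
--     res = set()
--     min_x, max_x, min_y, max_y = get_bounds(in_pixel_data)
--     margin = 2
--     for cur_x in range(min_x-margin, max_x+margin+1):
--         for cur_y in range(min_y-margin, max_y+margin+1):
--             if get_pixel_inner((cur_x, cur_y), 2):
--                 res.add((cur_x, cur_y))
--     return res
-- ===== SOURCE B (Python) =====
-- def _make_double_iteration(in_alg_data, in_pixel_data):
--     alg = set(in_alg_data)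
--     min_x = min(p[0] for p in in_pixel_data)
--     max_x = max(p[0] for p in in_pixel_data)
--     min_y = min(p[1] for p in in_pixel_data)
--     max_y = max(p[1] for p in in_pixel_data)
--
--     def step(lit, x0, x1, y0, y1):
--         new = set()
--         for x in range(x0, x1 + 1):
--             for y in range(y0, y1 + 1):
--                 idx = 0
--                 for dy in (1, 0, -1):
--                     for dx in (-1, 0, 1):
--                         idx = 2 * idx + ((x + dx, y + dy) in lit)
--                 if idx in alg:
--                     new.add((x, y))
--         return new
--
--     lit1 = step(set(in_pixel_data), min_x - 3, max_x + 3, min_y - 3, max_y + 3)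
--     return step(lit1, min_x - 2, max_x + 2, min_y - 2, max_y + 2)
-- ===== Notes on version B (the rewrite author's own statement) =====
-- stated objective: faster
-- what changed: Replaces A's top-down memoized recursion (per-pixel binary-string building and int(s,2) parsing, alg lookup by list membership) with a forward two-sweep simulation that materialises the step-1 lit set over an enlarged box and then sweeps the output box, accumulating the 9-bit index arithmetically and testing it against a hashed set of the algorithm indices.
-- outside the precondition, e.g. on _make_double_iteration({0, 3}, set()): A raises ValueError, B raises ValueError
import Mathlib
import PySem

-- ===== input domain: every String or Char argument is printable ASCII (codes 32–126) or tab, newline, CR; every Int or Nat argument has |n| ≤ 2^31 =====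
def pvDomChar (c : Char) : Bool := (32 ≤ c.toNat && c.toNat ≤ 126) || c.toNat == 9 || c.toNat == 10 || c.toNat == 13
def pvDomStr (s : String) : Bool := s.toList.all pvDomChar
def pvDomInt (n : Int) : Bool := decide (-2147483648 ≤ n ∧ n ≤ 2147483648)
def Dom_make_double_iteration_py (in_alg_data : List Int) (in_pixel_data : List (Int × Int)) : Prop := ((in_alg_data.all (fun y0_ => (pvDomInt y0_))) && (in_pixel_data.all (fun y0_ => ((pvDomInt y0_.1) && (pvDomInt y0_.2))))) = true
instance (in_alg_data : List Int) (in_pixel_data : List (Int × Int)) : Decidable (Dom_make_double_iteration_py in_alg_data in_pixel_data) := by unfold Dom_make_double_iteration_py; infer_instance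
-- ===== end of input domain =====

-- B replaces A's top-down memoized recursion by a forward two-step sweep over explicit
-- boxes using a materialised lit-pixel set per step (objective: alternative decomposition).

-- ===== PORT A =====
-- shift_list of get_all_neighbours
def pvShiftList : List (Int × Int) :=
  [(-1,1),(0,1),(1,1),(-1,0),(0,0),(1,0),(-1,-1),(0,-1),(1,-1)]

def get_all_neighbours_py (in_pos : Int × Int) : List (Int × Int) :=
  pvShiftList.map (fun s => (in_pos.1 + s.1, in_pos.2 + s.2))

-- min/max over an empty generator raise ValueError in Python: excluded by Pre_; the
-- .getD 0 default is never reached under Pre_.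
def get_bounds_py (in_pixel_data : List (Int × Int)) : Int × Int × Int × Int :=
  ((PySem.List.min? (in_pixel_data.map Prod.fst) (fun v => v)).getD 0,
   (PySem.List.max? (in_pixel_data.map Prod.fst) (fun v => v)).getD 0,
   (PySem.List.min? (in_pixel_data.map Prod.snd) (fun v => v)).getD 0,
   (PySem.List.max? (in_pixel_data.map Prod.snd) (fun v => v)).getD 0)

-- get_pixel_inner; the lru_cache is memoization only and does not change the value.
-- int(bin_val_str, 2) is ported as the base-2 fold over the characters, exact here
-- because every character produced by to_char is '0' or '1'.
def get_pixel_inner_py (in_alg_data : List Int) (in_pixel_data : List (Int × Int)) :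
    Int × Int → Nat → Bool
  | pos, 0 => in_pixel_data.contains pos
  | pos, n+1 =>
    let bin_chars := (get_all_neighbours_py pos).map
      (fun q => if get_pixel_inner_py in_alg_data in_pixel_data q n then '1' else '0')
    let v := bin_chars.foldl (fun a c => 2 * a + (if c = '1' then (1:Int) else 0)) 0
    in_alg_data.contains v

def make_double_iteration_py (in_alg_data : List Int) (in_pixel_data : List (Int × Int)) : List (Int × Int) :=
  let b := get_bounds_py in_pixel_data
  let min_x := b.1; let max_x := b.2.1; let min_y := b.2.2.1; let max_y := b.2.2.2
  let margin : Int := 2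
  (PySem.List.pyRange (min_x - margin) (max_x + margin + 1) 1).foldl
    (fun res cur_x =>
      (PySem.List.pyRange (min_y - margin) (max_y + margin + 1) 1).foldl
        (fun res cur_y =>
          if get_pixel_inner_py in_alg_data in_pixel_data (cur_x, cur_y) 2
          then PySem.Set.add res (cur_x, cur_y) else res)
        res)
    PySem.Set.empty

-- ===== PORT B =====
-- the 9-bit neighbourhood index of Source B's inner dy/dx loops
def pvIdx (lit : List (Int × Int)) (x y : Int) : Int :=
  ([(1:Int), 0, -1]).foldl
    (fun idx dy => ([(-1:Int), 0, 1]).foldl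
      (fun idx dx => 2 * idx + (if lit.contains (x + dx, y + dy) then (1:Int) else 0)) idx)
    0

-- one enhancement sweep of Source B's `step`
def pvStep (alg : PySem.Set Int) (lit : List (Int × Int)) (x0 x1 y0 y1 : Int) :
    PySem.Set (Int × Int) :=
  (PySem.List.pyRange x0 (x1 + 1) 1).foldl
    (fun new x =>
      (PySem.List.pyRange y0 (y1 + 1) 1).foldl
        (fun new y =>
          if PySem.Set.contains alg (pvIdx lit x y)
          then PySem.Set.add new (x, y) else new)
        new)
    PySem.Set.empty

def make_double_iteration_py_alt (in_alg_data : List Int) (in_pixel_data : List (Int × Int)) : List (Int × Int) :=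
  let alg := PySem.Set.ofList in_alg_data
  let min_x := (PySem.List.min? (in_pixel_data.map Prod.fst) (fun v => v)).getD 0
  let max_x := (PySem.List.max? (in_pixel_data.map Prod.fst) (fun v => v)).getD 0
  let min_y := (PySem.List.min? (in_pixel_data.map Prod.snd) (fun v => v)).getD 0
  let max_y := (PySem.List.max? (in_pixel_data.map Prod.snd) (fun v => v)).getD 0
  let lit1 := pvStep alg (PySem.Set.ofList in_pixel_data)
      (min_x - 3) (max_x + 3) (min_y - 3) (max_y + 3)
  pvStep alg lit1 (min_x - 2) (max_x + 2) (min_y - 2) (max_y + 2)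

-- ===== PRECONDITION & SPEC =====
-- Pre_ excludes only the empty pixel list, on which Python's min() raises ValueError.
def Pre_make_double_iteration_py (in_alg_data : List Int) (in_pixel_data : List (Int × Int)) : Prop :=
  in_pixel_data ≠ []
instance (in_alg_data : List Int) (in_pixel_data : List (Int × Int)) : Decidable (Pre_make_double_iteration_py in_alg_data in_pixel_data) := by unfold Pre_make_double_iteration_py; infer_instance

def pvWitness_make_double_iteration_py : List Int × (List (Int × Int)) := ([0, 3], [(0, 0), (1, 1)])

def Spec_make_double_iteration_py (in_alg_data : List Int) (in_pixel_data : List (Int × Int)) (out : List (Int × Int)) : Prop := out = make_double_iteration_py_alt in_alg_data in_pixel_data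
instance (in_alg_data : List Int) (in_pixel_data : List (Int × Int)) (out : List (Int × Int)) : Decidable (Spec_make_double_iteration_py in_alg_data in_pixel_data out) := by unfold Spec_make_double_iteration_py; infer_instance

-- ===== CLAIM (what is proved, stated in full; the proofs are below) =====
def Claim_equal_make_double_iteration_py : Prop := ∀ (in_alg_data : List Int) (in_pixel_data : List (Int × Int)), Dom_make_double_iteration_py in_alg_data in_pixel_data → Pre_make_double_iteration_py in_alg_data in_pixel_data → Spec_make_double_iteration_py in_alg_data in_pixel_data (make_double_iteration_py in_alg_data in_pixel_data)

-- ===== LEMMAS AND PROOFS =====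

lemma pv_char_bit (b : Bool) :
    (if (if b then '1' else '0') = '1' then (1:Int) else 0) = if b then 1 else 0 := by
  cases b <;> simp

lemma pv_contains_ofList {α : Type} [BEq α] [LawfulBEq α] (xs : List α) (v : α) :
    List.contains (PySem.Set.ofList xs) v = List.contains xs v := by
  by_cases h : v ∈ xs <;>
    simp [PySem.Set.mem_ofList, h]

-- membership in one inner sweep row
lemma pv_mem_row (ys : List Int) (c : Int → Bool) (x : Int)
    (s : PySem.Set (Int × Int)) (p : Int × Int) :
    (p ∈ ys.foldl (fun s y => if c y then PySem.Set.add s (x, y) else s) s)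
      ↔ p ∈ s ∨ ∃ y ∈ ys, c y ∧ p = (x, y) := by
  induction ys generalizing s with
  | nil => simp
  | cons y t ih =>
    simp only [List.foldl_cons]
    rw [ih]
    by_cases h : c y
    · simp [h, PySem.Set.mem_add]
      tauto
    · simp [h]


-- membership in the whole double sweep
lemma pv_mem_sweep (xs ys : List Int) (c : Int → Int → Bool)
    (s : PySem.Set (Int × Int)) (p : Int × Int) :
    (p ∈ xs.foldl (fun s x => ys.foldl
        (fun s y => if c x y then PySem.Set.add s (x, y) else s) s) s)
      ↔ p ∈ s ∨ ∃ x ∈ xs, ∃ y ∈ ys, c x y ∧ p = (x, y) := by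
  induction xs generalizing s with
  | nil => simp
  | cons x t ih =>
    simp only [List.foldl_cons]
    rw [ih, pv_mem_row]
    constructor
    · rintro ((h | ⟨y, hy, hc, rfl⟩) | h)
      · exact Or.inl h
      · exact Or.inr ⟨x, by simp, y, hy, hc, rfl⟩
      · rcases h with ⟨x', hx', rest⟩
        exact Or.inr ⟨x', by simp [hx'], rest⟩
    · rintro (h | ⟨x', hx', y, hy, hc, rfl⟩)
      · exact Or.inl (Or.inl h)
      · rcases List.mem_cons.mp hx' with rfl | hx'
        · exact Or.inl (Or.inr ⟨y, hy, hc, rfl⟩)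
        · exact Or.inr ⟨x', hx', y, hy, hc, rfl⟩

lemma pv_mem_step (alg : PySem.Set Int) (lit : List (Int × Int)) (x0 x1 y0 y1 : Int)
    (p : Int × Int) :
    p ∈ pvStep alg lit x0 x1 y0 y1 ↔
      x0 ≤ p.1 ∧ p.1 ≤ x1 ∧ y0 ≤ p.2 ∧ p.2 ≤ y1 ∧
        PySem.Set.contains alg (pvIdx lit p.1 p.2) = true := by
  unfold pvStep
  rw [pv_mem_sweep]
  constructor
  · rintro (h | ⟨x, hx, y, hy, hc, rfl⟩)
    · simp [PySem.Set.empty] at h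
    · rw [PySem.List.mem_pyRange_one] at hx hy
      exact ⟨hx.1, by omega, hy.1, by omega, hc⟩
  · rintro ⟨h1, h2, h3, h4, hc⟩
    refine Or.inr ⟨p.1, ?_, p.2, ?_, hc, rfl⟩
    · rw [PySem.List.mem_pyRange_one]; omega
    · rw [PySem.List.mem_pyRange_one]; omega

-- the 9-bit index equals A's parsed binary string when the bit sources agree on the 9 neighbours
lemma pv_idx_eq (lit : List (Int × Int)) (f : Int × Int → Bool) (x y : Int)
    (h : ∀ dx dy : Int, -1 ≤ dx → dx ≤ 1 → -1 ≤ dy → dy ≤ 1 →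
      lit.contains (x + dx, y + dy) = f (x + dx, y + dy)) :
    pvIdx lit x y =
      ((get_all_neighbours_py (x, y)).map (fun q => if f q then '1' else '0')).foldl
        (fun a c => 2 * a + (if c = '1' then (1:Int) else 0)) 0 := by
  simp only [pvIdx, get_all_neighbours_py, pvShiftList, List.map, List.foldl, pv_char_bit]
  rw [h (-1) 1 (by norm_num) (by norm_num) (by norm_num) (by norm_num),
      h 0 1 (by norm_num) (by norm_num) (by norm_num) (by norm_num),
      h 1 1 (by norm_num) (by norm_num) (by norm_num) (by norm_num),
      h (-1) 0 (by norm_num) (by norm_num) (by norm_num) (by norm_num),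
      h 0 0 (by norm_num) (by norm_num) (by norm_num) (by norm_num),
      h 1 0 (by norm_num) (by norm_num) (by norm_num) (by norm_num),
      h (-1) (-1) (by norm_num) (by norm_num) (by norm_num) (by norm_num),
      h 0 (-1) (by norm_num) (by norm_num) (by norm_num) (by norm_num),
      h 1 (-1) (by norm_num) (by norm_num) (by norm_num) (by norm_num)]

-- step-1 condition: B's test at (x,y) over the raw pixel set is A's iteration-1 pixel
lemma pv_cond1 (in_alg_data : List Int) (in_pixel_data : List (Int × Int)) (x y : Int) :
    PySem.Set.contains (PySem.Set.ofList in_alg_data)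
        (pvIdx (PySem.Set.ofList in_pixel_data) x y)
      = get_pixel_inner_py in_alg_data in_pixel_data (x, y) 1 := by
  rw [pv_idx_eq (PySem.Set.ofList in_pixel_data)
      (fun q => get_pixel_inner_py in_alg_data in_pixel_data q 0) x y
      (by intro dx dy _ _ _ _
          simp [get_pixel_inner_py])]
  simp [get_pixel_inner_py, PySem.Set.contains_eq_listContains]

-- step-2 condition inside the output box: B's test over the materialised step-1 set
-- is A's iteration-2 pixel
lemma pv_cond2 (in_alg_data : List Int) (in_pixel_data : List (Int × Int))
    (min_x max_x min_y max_y x y : Int)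
    (hx1 : min_x - 2 ≤ x) (hx2 : x ≤ max_x + 2) (hy1 : min_y - 2 ≤ y) (hy2 : y ≤ max_y + 2) :
    PySem.Set.contains (PySem.Set.ofList in_alg_data)
        (pvIdx (pvStep (PySem.Set.ofList in_alg_data) (PySem.Set.ofList in_pixel_data)
            (min_x - 3) (max_x + 3) (min_y - 3) (max_y + 3)) x y)
      = get_pixel_inner_py in_alg_data in_pixel_data (x, y) 2 := by
  rw [pv_idx_eq _ (fun q => get_pixel_inner_py in_alg_data in_pixel_data q 1) x y ?_]
  · conv_rhs => rw [get_pixel_inner_py]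
    simp only [PySem.Set.contains_eq_listContains]
    rw [pv_contains_ofList]
  · intro dx dy h1 h2 h3 h4
    show List.contains _ _ = get_pixel_inner_py in_alg_data in_pixel_data (x + dx, y + dy) 1
    rw [← pv_cond1 in_alg_data in_pixel_data (x + dx) (y + dy)]
    by_cases hc : PySem.Set.contains (PySem.Set.ofList in_alg_data)
        (pvIdx (PySem.Set.ofList in_pixel_data) (x + dx) (y + dy)) = true
    · have hm : (x + dx, y + dy) ∈ pvStep (PySem.Set.ofList in_alg_data)
          (PySem.Set.ofList in_pixel_data) (min_x - 3) (max_x + 3) (min_y - 3) (max_y + 3) :=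
        (pv_mem_step _ _ _ _ _ _ _).mpr ⟨by omega, by omega, by omega, by omega, hc⟩
      simp only [PySem.Set.contains_eq_listContains, List.contains_iff_mem,
        PySem.Set.mem_ofList] at hc
      simp [hm, PySem.Set.contains_eq_listContains, PySem.Set.mem_ofList, hc]
    · have hm : (x + dx, y + dy) ∉ pvStep (PySem.Set.ofList in_alg_data)
          (PySem.Set.ofList in_pixel_data) (min_x - 3) (max_x + 3) (min_y - 3) (max_y + 3) :=
        fun hmem => hc ((pv_mem_step _ _ _ _ _ _ _).mp hmem).2.2.2.2
      simp only [PySem.Set.contains_eq_listContains, List.contains_iff_mem,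
        PySem.Set.mem_ofList] at hc
      simp [hm, PySem.Set.contains_eq_listContains, PySem.Set.mem_ofList, hc]

-- pointwise-equal conditions give equal sweep rows / sweeps (same insertion order,
-- so the resulting lists are equal)
lemma pv_row_congr (ys : List Int) (c d : Int → Bool)
    (h : ∀ y ∈ ys, c y = d y) (x : Int) :
    ∀ s : PySem.Set (Int × Int),
      ys.foldl (fun s y => if c y then PySem.Set.add s (x, y) else s) s
        = ys.foldl (fun s y => if d y then PySem.Set.add s (x, y) else s) s := by
  induction ys with
  | nil => intro _; rfl
  | cons y u ih =>
    intro s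
    simp only [List.foldl_cons]
    rw [h y (by simp)]
    exact ih (fun a ha => h a (by simp [ha])) _

lemma pv_sweep_congr (ys : List Int) (c d : Int → Int → Bool) :
    ∀ xs : List Int, (∀ x ∈ xs, ∀ y ∈ ys, c x y = d x y) →
    ∀ s : PySem.Set (Int × Int),
      xs.foldl (fun s x => ys.foldl
          (fun s y => if c x y then PySem.Set.add s (x, y) else s) s) s
        = xs.foldl (fun s x => ys.foldl
          (fun s y => if d x y then PySem.Set.add s (x, y) else s) s) s := by
  intro xs
  induction xs with
  | nil => intro _ _; rfl
  | cons x t ih =>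
    intro h s
    simp only [List.foldl_cons]
    rw [pv_row_congr ys (c x) (d x) (h x (by simp)) x s]
    exact ih (fun a ha y hy => h a (by simp [ha]) y hy) _

-- ===== VERDICT (by name: the statement is the Claim_ definition above) =====
theorem make_double_iteration_py_spec : Claim_equal_make_double_iteration_py := by
  intro in_alg_data in_pixel_data _ _
  unfold Spec_make_double_iteration_py
  unfold make_double_iteration_py make_double_iteration_py_alt get_bounds_py pvStep
  dsimp only
  apply pv_sweep_congr
  intro x hx y hy
  rw [PySem.List.mem_pyRange_one] at hx hy
  exact (pv_cond2 in_alg_data in_pixel_data _ _ _ _ x y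
    (by omega) (by omega) (by omega) (by omega)).symm
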